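-- pv_equiv track=rewrite | github.com/vsousaesilva/video-automation | backend/modules/video_engine/services/publisher_youtube.py | _build_tags
-- ===== SOURCE A (Python) =====
-- def _build_tags(conteudo: dict) -> list[str]:
--     """Extrai tags a partir de hashtags e keywords SEO."""
--     tags = []
--
--     # Hashtags YouTube (sem o #)
--     for h in (conteudo.get("hashtags_youtube") or []):
--         tag = h.lstrip("#").strip()
--         if tag:
--             tags.append(tag)
--
--     # Keywords SEO
--     for k in (conteudo.get("keywords_seo") or []):
--         if k.strip() and k.strip() not in tags:
--             tags.append(k.strip())
--
--     # YouTube limita a 500 caracteres no total de tags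
--     result = []
--     total_chars = 0
--     for tag in tags:
--         if total_chars + len(tag) + 1 > 500:
--             break
--         result.append(tag)
--         total_chars += len(tag) + 1  # +1 para virgula
--
--     return result
-- ===== SOURCE B (Python) =====
-- def _build_tags(conteudo: dict) -> list[str]:
--     """One pass: build the result directly under the 500-char budget,
--     deduping keywords against a seen-set, instead of build-then-truncate."""
--     result = []
--     total_chars = 0
--     seen = set()
--     for h in (conteudo.get("hashtags_youtube") or []):
--         tag = h.lstrip("#").strip()
--         if not tag:
--             continue
--         if total_chars + len(tag) + 1 > 500:
--             return result
--         result.append(tag)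
--         total_chars += len(tag) + 1
--         seen.add(tag)
--     for k in (conteudo.get("keywords_seo") or []):
--         t = k.strip()
--         if not t or t in seen:
--             continue
--         if total_chars + len(t) + 1 > 500:
--             return result
--         result.append(t)
--         total_chars += len(t) + 1
--         seen.add(t)
--     return result
-- ===== Notes on version B (the rewrite author's own statement) =====
-- stated objective: alternative
-- what changed: Single fused pass with a running char budget and a seen-set, returning as soon as the 500-char limit would be exceeded, instead of building the full deduped tag list and then truncating it in a separate loop.
import Mathlib
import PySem

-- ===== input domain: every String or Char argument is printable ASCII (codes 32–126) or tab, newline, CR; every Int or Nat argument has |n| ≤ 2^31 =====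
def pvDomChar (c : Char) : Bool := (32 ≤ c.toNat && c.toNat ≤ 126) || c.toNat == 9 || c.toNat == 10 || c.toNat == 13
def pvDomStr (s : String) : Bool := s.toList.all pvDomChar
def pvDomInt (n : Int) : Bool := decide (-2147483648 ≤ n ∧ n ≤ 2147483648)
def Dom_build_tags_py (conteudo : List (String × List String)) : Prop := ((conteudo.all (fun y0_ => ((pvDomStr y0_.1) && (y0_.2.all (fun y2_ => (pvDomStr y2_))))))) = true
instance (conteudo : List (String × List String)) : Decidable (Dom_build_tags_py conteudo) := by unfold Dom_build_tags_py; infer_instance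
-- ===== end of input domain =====

-- B fuses A's three sequential loops into one pass with a running char budget and a seen-set (alternative decomposition; return value proved equal).

-- ===== PORT A =====
-- h.lstrip("#").strip(): lstrip("#") ported by hand as dropWhile (· == '#') — exact (drops exactly the leading '#' chars)
def pvTagOf (h : String) : String := PySem.Str.strip (String.ofList (h.toList.dropWhile (· == '#')))

-- the final 'for tag in tags: … break' loop of A, as structural recursion over (result, total_chars)
def pvTruncA : List String → List String → Int → List String
  | [], result, _ => result
  | tag :: rest, result, total_chars =>
    if total_chars + PySem.Str.len tag + 1 > 500 then result
    else pvTruncA rest (result ++ [tag]) (total_chars + PySem.Str.len tag + 1)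

def build_tags_py (conteudo : List (String × List String)) : List String :=
  let tags : List String :=
    (PySem.Dict.getD (PySem.Dict.mk conteudo) "hashtags_youtube" []).foldl
      (fun tags h =>
        let tag := pvTagOf h
        if tag ≠ "" then tags ++ [tag] else tags) []
  let tags : List String :=
    (PySem.Dict.getD (PySem.Dict.mk conteudo) "keywords_seo" []).foldl
      (fun tags k =>
        if PySem.Str.strip k ≠ "" ∧ PySem.Str.strip k ∉ tags then tags ++ [PySem.Str.strip k] else tags)
      tags
  pvTruncA tags [] 0

-- ===== PORT B =====
-- keyword phase of B's single pass: (result, total_chars, seen); early 'return result' on overflow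
def pvBKeys : List String → List String → Int → PySem.Set String → List String
  | [], result, _, _ => result
  | k :: ks, result, total_chars, seen =>
    let t := PySem.Str.strip k
    if t = "" ∨ t ∈ seen then pvBKeys ks result total_chars seen
    else if total_chars + PySem.Str.len t + 1 > 500 then result
    else pvBKeys ks (result ++ [t]) (total_chars + PySem.Str.len t + 1) (PySem.Set.add seen t)

-- hashtag phase of B's single pass, falling through to the keyword phase
def pvBHash : List String → List String → List String → Int → PySem.Set String → List String
  | [], ks, result, total_chars, seen => pvBKeys ks result total_chars seen
  | h :: hs, ks, result, total_chars, seen =>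
    let tag := pvTagOf h
    if tag = "" then pvBHash hs ks result total_chars seen
    else if total_chars + PySem.Str.len tag + 1 > 500 then result
    else pvBHash hs ks (result ++ [tag]) (total_chars + PySem.Str.len tag + 1) (PySem.Set.add seen tag)

def build_tags_py_alt (conteudo : List (String × List String)) : List String :=
  pvBHash (PySem.Dict.getD (PySem.Dict.mk conteudo) "hashtags_youtube" [])
          (PySem.Dict.getD (PySem.Dict.mk conteudo) "keywords_seo" []) [] 0 PySem.Set.empty

-- ===== PRECONDITION & SPEC =====
def Spec_build_tags_py (conteudo : List (String × List String)) (out : List String) : Prop := out = build_tags_py_alt conteudo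
instance (conteudo : List (String × List String)) (out : List String) : Decidable (Spec_build_tags_py conteudo out) := by unfold Spec_build_tags_py; infer_instance

-- ===== CLAIM (what is proved, stated in full; the proofs are below) =====
def Claim_equal_build_tags_py : Prop := ∀ (conteudo : List (String × List String)), Dom_build_tags_py conteudo → Spec_build_tags_py conteudo (build_tags_py conteudo)

-- ===== LEMMAS AND PROOFS =====

-- the list of stripped, nonempty hashtag tags (A's first loop, appended part)
def pvHl : List String → List String
  | [] => []
  | h :: hs => if pvTagOf h ≠ "" then pvTagOf h :: pvHl hs else pvHl hs

-- the deduped stripped keywords appended against accumulator acc (A's second loop, appended part)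
def pvKl : List String → List String → List String
  | [], _ => []
  | k :: ks, acc =>
    if PySem.Str.strip k ≠ "" ∧ PySem.Str.strip k ∉ acc then
      PySem.Str.strip k :: pvKl ks (acc ++ [PySem.Str.strip k])
    else pvKl ks acc

theorem pv_foldH (hs : List String) (acc : List String) :
    hs.foldl (fun tags h => let tag := pvTagOf h; if tag ≠ "" then tags ++ [tag] else tags) acc
      = acc ++ pvHl hs := by
  induction hs generalizing acc with
  | nil => simp [pvHl]
  | cons h hs ih =>
    rw [List.foldl_cons]
    show List.foldl _ (if pvTagOf h ≠ "" then acc ++ [pvTagOf h] else acc) hs = _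
    by_cases hne : pvTagOf h = ""
    · rw [if_neg (by simp [hne]), ih, pvHl, if_neg (by simp [hne])]
    · rw [if_pos hne, ih, pvHl, if_pos hne]; simp

theorem pv_foldK (ks : List String) (acc : List String) :
    ks.foldl (fun tags k =>
        if PySem.Str.strip k ≠ "" ∧ PySem.Str.strip k ∉ tags then tags ++ [PySem.Str.strip k] else tags) acc
      = acc ++ pvKl ks acc := by
  induction ks generalizing acc with
  | nil => simp [pvKl]
  | cons k ks ih =>
    rw [List.foldl_cons]
    show List.foldl _ (if PySem.Str.strip k ≠ "" ∧ PySem.Str.strip k ∉ acc then acc ++ [PySem.Str.strip k] else acc) ks = _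
    by_cases hc : PySem.Str.strip k ≠ "" ∧ PySem.Str.strip k ∉ acc
    · rw [if_pos hc, ih, pvKl, if_pos hc]; simp
    · rw [if_neg hc, ih, pvKl, if_neg hc]

theorem pv_keys_eq (ks : List String) (result : List String) (total : Int)
    (seen : PySem.Set String) (L : List String) (hmem : ∀ t, t ∈ seen ↔ t ∈ L) :
    pvBKeys ks result total seen = pvTruncA (pvKl ks L) result total := by
  induction ks generalizing result total seen L with
  | nil => simp [pvBKeys, pvKl, pvTruncA]
  | cons k ks ih =>
    simp only [pvBKeys, pvKl]
    by_cases hskip : PySem.Str.strip k = "" ∨ PySem.Str.strip k ∈ seen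
    · rw [if_pos hskip]
      have : ¬ (PySem.Str.strip k ≠ "" ∧ PySem.Str.strip k ∉ L) := by
        rcases hskip with h | h
        · exact fun hc => hc.1 h
        · exact fun hc => hc.2 ((hmem _).mp h)
      rw [if_neg this]
      exact ih result total seen L hmem
    · push Not at hskip
      have hin : PySem.Str.strip k ≠ "" ∧ PySem.Str.strip k ∉ L := ⟨hskip.1, fun h => hskip.2 ((hmem _).mpr h)⟩
      rw [if_neg (by simpa using hskip), if_pos hin]
      simp only [pvTruncA]
      by_cases hov : total + PySem.Str.len (PySem.Str.strip k) + 1 > 500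
      · rw [if_pos hov, if_pos hov]
      · rw [if_neg hov, if_neg hov]
        exact ih _ _ _ _ (by intro t; simp [PySem.Set.mem_add, hmem t])

theorem pv_trunc_cons (tag : String) (rest result : List String) (total : Int) :
    pvTruncA (tag :: rest) result total =
      if total + PySem.Str.len tag + 1 > 500 then result
      else pvTruncA rest (result ++ [tag]) (total + PySem.Str.len tag + 1) := rfl

theorem pv_hash_eq (hs ks : List String) (result : List String) (total : Int)
    (seen : PySem.Set String) (L : List String) (hmem : ∀ t, t ∈ seen ↔ t ∈ L) :
    pvBHash hs ks result total seen = pvTruncA (pvHl hs ++ pvKl ks (L ++ pvHl hs)) result total := by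
  induction hs generalizing result total seen L with
  | nil =>
    simp only [pvBHash, pvHl, List.nil_append, List.append_nil]
    exact pv_keys_eq ks result total seen L hmem
  | cons h hs ih =>
    simp only [pvBHash, pvHl]
    by_cases hempty : pvTagOf h = ""
    · rw [if_pos hempty, if_neg (by simp [hempty])]
      exact ih result total seen L hmem
    · rw [if_neg hempty, if_pos hempty]
      rw [List.cons_append, pv_trunc_cons]
      by_cases hov : total + PySem.Str.len (pvTagOf h) + 1 > 500
      · rw [if_pos hov, if_pos hov]
      · rw [if_neg hov, if_neg hov]
        rw [ih (result ++ [pvTagOf h]) _ (PySem.Set.add seen (pvTagOf h)) (L ++ [pvTagOf h])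
            (by intro t; simp [PySem.Set.mem_add, hmem t])]
        rw [List.append_assoc]
        rfl

-- ===== VERDICT (by name: the statement is the Claim_ definition above) =====
theorem build_tags_py_spec : Claim_equal_build_tags_py := by
  intro conteudo _
  unfold Spec_build_tags_py
  have hA : build_tags_py conteudo =
      pvTruncA
        ((PySem.Dict.getD (PySem.Dict.mk conteudo) "keywords_seo" []).foldl
          (fun tags k => if PySem.Str.strip k ≠ "" ∧ PySem.Str.strip k ∉ tags then tags ++ [PySem.Str.strip k] else tags)
          ((PySem.Dict.getD (PySem.Dict.mk conteudo) "hashtags_youtube" []).foldl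
            (fun tags h => let tag := pvTagOf h; if tag ≠ "" then tags ++ [tag] else tags) []))
        [] 0 := rfl
  have hB : build_tags_py_alt conteudo =
      pvBHash (PySem.Dict.getD (PySem.Dict.mk conteudo) "hashtags_youtube" [])
        (PySem.Dict.getD (PySem.Dict.mk conteudo) "keywords_seo" []) [] 0 PySem.Set.empty := rfl
  rw [hA, hB, pv_foldH, pv_foldK, List.nil_append]
  rw [pv_hash_eq _ _ _ _ _ [] (by intro t; simp [PySem.Set.empty]), List.nil_append]
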